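-- pv_equiv track=rewrite | github.com/kassvl/GitHealthCheck-CLI | repo_health_analyzer/core/analyzers/code_quality_analyzer.py | _calculate_function_lengths_fast
-- ===== SOURCE A (Python) =====
-- from typing import List, Dict, Any, Set, Tuple
--
-- def _calculate_function_lengths_fast(content: str, patterns: Dict) -> List[int]:
--     """Fast function length calculation."""
--     lengths = []
--     lines = content.split('\n')
--     in_function = False
--     current_length = 0
--
--     for line in lines:
--         if 'def ' in line:
--             if in_function and current_length > 0:
--                 lengths.append(current_length)
--             in_function = True
--             current_length = 1
--         elif in_function:
--             if line.strip() and not line.startswith(' ') and not line.startswith('\t'):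
--                 lengths.append(current_length)
--                 in_function = False
--                 current_length = 0
--             else:
--                 current_length += 1
--
--     if in_function and current_length > 0:
--         lengths.append(current_length)
--
--     return lengths[:5]  # Limit to 5 functions
-- ===== SOURCE B (Python) =====
-- def _calculate_function_lengths_fast(content, patterns):
--     """Block-scan: for each 'def ' line, measure its block by scanning forward; stop after 5."""
--     lines = content.split('\n')
--     lengths = []
--     i, n = 0, len(lines)
--     while i < n and len(lengths) < 5:
--         if 'def ' not in lines[i]:
--             i += 1
--             continue
--         j = i + 1
--         while j < n and 'def ' not in lines[j] and (not lines[j].strip() or lines[j].startswith((' ', '\t'))):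
--             j += 1
--         lengths.append(j - i)
--         i = j
--     return lengths
-- ===== Notes on version B (the rewrite author's own statement) =====
-- stated objective: alternative
-- what changed: Replaces A's one-pass boolean state machine (in_function flag + running counter threaded through every line, with a final flush and a [:5] slice) by a block decomposition: an index scan jumps to each 'def ' line, measures its block with an inner forward scan over body lines (blank/indented/non-def), appends the block length, and stops as soon as 5 lengths are collected.
import Mathlib
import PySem

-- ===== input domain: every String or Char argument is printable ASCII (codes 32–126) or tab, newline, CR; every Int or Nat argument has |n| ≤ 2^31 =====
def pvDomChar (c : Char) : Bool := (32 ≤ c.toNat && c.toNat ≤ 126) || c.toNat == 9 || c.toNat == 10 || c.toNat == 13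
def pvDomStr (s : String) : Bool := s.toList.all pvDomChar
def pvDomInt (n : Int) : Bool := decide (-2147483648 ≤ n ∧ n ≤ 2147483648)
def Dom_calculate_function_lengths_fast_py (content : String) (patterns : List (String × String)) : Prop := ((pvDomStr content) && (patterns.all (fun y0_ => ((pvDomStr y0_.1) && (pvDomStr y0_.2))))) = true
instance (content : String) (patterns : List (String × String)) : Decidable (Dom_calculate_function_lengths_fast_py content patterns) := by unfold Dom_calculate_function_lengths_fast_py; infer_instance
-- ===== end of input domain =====

-- B replaces A's boolean state machine by a jump-to-def / measure-block decomposition; same cost, different structure (objective: alternative).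

-- ===== PORT A =====
-- the for-loop of A, as structural recursion over the lines with the same state (in_function, current_length, lengths)
def pvLoopA : List String → Bool → Int → List Int → List Int
  | [], inF, cur, lengths =>
      if inF && decide (cur > 0) then lengths ++ [cur] else lengths
  | line :: rest, inF, cur, lengths =>
      if PySem.Str.isIn "def " line then
        pvLoopA rest true 1 (if inF && decide (cur > 0) then lengths ++ [cur] else lengths)
      else if inF then
        if !(PySem.Str.strip line == "") && !(PySem.Str.startswith line " ") && !(PySem.Str.startswith line "\t") then
          pvLoopA rest false 0 (lengths ++ [cur])
        else
          pvLoopA rest inF (cur + 1) lengths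
      else
        pvLoopA rest inF cur lengths

def calculate_function_lengths_fast_py (content : String) (patterns : List (String × String)) : List Int :=
  let lines := (PySem.Str.split? content "\n").getD []
  PySem.List.slice (pvLoopA lines false 0 []) none (some 5)   -- lengths[:5]

-- ===== PORT B =====
def pvIsDef (line : String) : Bool := PySem.Str.isIn "def " line

def pvIsBody (line : String) : Bool :=
  !pvIsDef line && (PySem.Str.strip line == "" || PySem.Str.startswith line " " || PySem.Str.startswith line "\t")

-- B's outer while loop over the remaining suffix of lines; k = remaining capacity (5 - len(lengths));
-- the inner while scan (advance j while the line is a body line) is the takeWhile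
def pvAltLoop : List String → Nat → List Int
  | [], _ => []
  | _ :: _, 0 => []
  | l :: rest, k + 1 =>
      if pvIsDef l then
        (1 + ((rest.takeWhile pvIsBody).length : Int)) ::
          pvAltLoop (rest.drop (rest.takeWhile pvIsBody).length) k
      else
        pvAltLoop rest (k + 1)
termination_by lines _ => lines.length
decreasing_by all_goals (simp [List.length_drop]; try omega)

def calculate_function_lengths_fast_py_alt (content : String) (patterns : List (String × String)) : List Int :=
  let lines := (PySem.Str.split? content "\n").getD []
  pvAltLoop lines 5

-- ===== PRECONDITION & SPEC =====
def Spec_calculate_function_lengths_fast_py (content : String) (patterns : List (String × String)) (out : List Int) : Prop := out = calculate_function_lengths_fast_py_alt content patterns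
instance (content : String) (patterns : List (String × String)) (out : List Int) : Decidable (Spec_calculate_function_lengths_fast_py content patterns out) := by unfold Spec_calculate_function_lengths_fast_py; infer_instance

-- ===== CLAIM (what is proved, stated in full; the proofs are below) =====
def Claim_equal_calculate_function_lengths_fast_py : Prop := ∀ (content : String) (patterns : List (String × String)), Dom_calculate_function_lengths_fast_py content patterns → Spec_calculate_function_lengths_fast_py content patterns (calculate_function_lengths_fast_py content patterns)

-- ===== LEMMAS AND PROOFS =====

-- uncapped block decomposition: the full list of block lengths
def pvFull : List String → List Int
  | [] => []
  | l :: rest =>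
      if pvIsDef l then
        (1 + ((rest.takeWhile pvIsBody).length : Int)) ::
          pvFull (rest.drop (rest.takeWhile pvIsBody).length)
      else
        pvFull rest
termination_by lines => lines.length
decreasing_by all_goals (simp [List.length_drop]; try omega)

theorem pvAlt_eq_take : ∀ (lines : List String) (k : Nat), pvAltLoop lines k = (pvFull lines).take k
  | [], k => by simp [pvAltLoop, pvFull]
  | _ :: _, 0 => by simp [pvAltLoop]
  | l :: rest, k + 1 => by
      rw [pvAltLoop, pvFull]
      by_cases h : pvIsDef l
      · simp only [h, if_true, List.take_succ_cons]
        rw [pvAlt_eq_take (rest.drop (rest.takeWhile pvIsBody).length) k]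
      · simp only [h, if_false, Bool.false_eq_true]
        exact pvAlt_eq_take rest (k + 1)
termination_by lines _ => lines.length
decreasing_by all_goals (simp [List.length_drop]; try omega)

theorem pvLoop_char : ∀ (lines : List String),
    (∀ (cur : Int) (acc : List Int), pvLoopA lines false cur acc = acc ++ pvFull lines) ∧
    (∀ (cur : Int) (acc : List Int), 0 < cur →
      pvLoopA lines true cur acc =
        acc ++ (cur + ((lines.takeWhile pvIsBody).length : Int)) ::
          pvFull (lines.drop (lines.takeWhile pvIsBody).length))
  | [] => by
      constructor
      · intro cur acc; simp [pvLoopA, pvFull]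
      · intro cur acc hcur
        simp [pvLoopA, pvFull, hcur]
  | l :: rest => by
      have ihF := (pvLoop_char rest).1
      have ihT := (pvLoop_char rest).2
      constructor
      · intro cur acc
        rw [pvLoopA, pvFull.eq_def]
        cases h : pvIsDef l
        · have h' : PySem.Str.isIn "def " l = false := by simpa [pvIsDef] using h
          simp only [h, h', Bool.false_eq_true, if_false]
          exact ihF cur acc
        · have h' : PySem.Str.isIn "def " l = true := by simpa [pvIsDef] using h
          simp only [h, h', if_true, Bool.false_and, Bool.false_eq_true, if_false]
          rw [ihT 1 acc (by norm_num)]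
      · intro cur acc hcur
        rw [pvLoopA]
        cases h : pvIsDef l
        · have h' : PySem.Str.isIn "def " l = false := by simpa [pvIsDef] using h
          by_cases ht : (!(PySem.Str.strip l == "") && !(PySem.Str.startswith l " ") && !(PySem.Str.startswith l "\t")) = true
          · -- column-0 terminator: close the block
            have hb : pvIsBody l = false := by
              simp only [pvIsBody, h, Bool.not_false, Bool.true_and]
              cases h1 : (PySem.Str.strip l == "") <;> cases h2 : PySem.Str.startswith l " " <;>
                cases h3 : PySem.Str.startswith l "\t" <;> simp_all
            simp only [h', Bool.false_eq_true, if_false, if_true, ht]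
            rw [ihF 0 (acc ++ [cur]), List.takeWhile_cons_of_neg (by simp [hb])]
            conv_rhs => rw [pvFull.eq_def]
            simp [h]
          · -- body line: extend the block
            have hb : pvIsBody l = true := by
              simp only [pvIsBody, h, Bool.not_false, Bool.true_and]
              cases h1 : (PySem.Str.strip l == "") <;> cases h2 : PySem.Str.startswith l " " <;>
                cases h3 : PySem.Str.startswith l "\t" <;> simp_all
            simp only [h', Bool.false_eq_true, if_false, if_true, ht]
            rw [ihT (cur + 1) acc (by omega), List.takeWhile_cons_of_pos (by simp [hb])]
            simp only [List.length_cons, List.drop_succ_cons]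
            have : cur + 1 + ((List.takeWhile pvIsBody rest).length : Int)
                 = cur + (((List.takeWhile pvIsBody rest).length : Int) + 1) := by ring
            rw [this]
            push_cast
            rfl
        · -- a def line: close current block (length cur) and start a new one
          have h' : PySem.Str.isIn "def " l = true := by simpa [pvIsDef] using h
          have hb : pvIsBody l = false := by simp [pvIsBody, h]
          simp only [h', if_true, Bool.true_and, hcur, decide_true, if_true]
          rw [ihT 1 (acc ++ [cur]) (by norm_num), List.takeWhile_cons_of_neg (by simp [hb])]
          conv_rhs => rw [pvFull.eq_def]
          simp [h]

-- ===== VERDICT (by name: the statement is the Claim_ definition above) =====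
theorem calculate_function_lengths_fast_py_spec : Claim_equal_calculate_function_lengths_fast_py := by
  intro content patterns _
  unfold Spec_calculate_function_lengths_fast_py
  unfold calculate_function_lengths_fast_py calculate_function_lengths_fast_py_alt
  rw [pvAlt_eq_take]
  show PySem.List.slice (pvLoopA ((PySem.Str.split? content "\n").getD []) false 0 []) none (some 5) = _
  rw [(pvLoop_char _).1, PySem.List.slice_to _ (by norm_num)]
  rfl
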